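-- pv_equiv track=rewrite | github.com/kavinash-samsung/algorithm-practice | codevita/single lane.py | noofgroups
-- ===== SOURCE A (Python) =====
-- from math import factorial
--
-- dictx = {}
--
-- def noofgroups(n):
--   if n in dictx:
--     return dictx[n]
--   if n == 0:
--     return 0
--   x = (n)*noofgroups(n-1)+factorial(n-1)
--   dictx[n] = x
--   return x
-- ===== SOURCE B (Python) =====
-- def noofgroups(n):
--   x, fact = 0, 1
--   for i in range(1, n + 1):
--     x = i * x + fact
--     fact *= i
--   return x
-- ===== Notes on version B (the rewrite author's own statement) =====
-- stated objective: faster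
-- what changed: replaces the memoized recursion that calls math.factorial at every level with a single bottom-up loop that maintains the running factorial incrementally
import Mathlib
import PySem

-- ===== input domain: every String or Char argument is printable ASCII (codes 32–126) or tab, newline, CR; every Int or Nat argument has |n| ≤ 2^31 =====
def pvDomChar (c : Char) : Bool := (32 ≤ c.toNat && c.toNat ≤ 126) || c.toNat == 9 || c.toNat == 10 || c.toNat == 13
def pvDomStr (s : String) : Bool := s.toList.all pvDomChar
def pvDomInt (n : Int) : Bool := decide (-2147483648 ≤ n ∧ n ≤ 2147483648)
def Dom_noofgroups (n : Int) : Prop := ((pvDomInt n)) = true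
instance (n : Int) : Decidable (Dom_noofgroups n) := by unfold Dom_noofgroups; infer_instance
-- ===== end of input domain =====

-- B replaces A's memoized recursion (which recomputes factorial at every level) by one
-- bottom-up loop carrying the running factorial; timing run: asymptotically faster.
-- A's module-level memo dict only caches results; it never changes the returned value,
-- so the port is the plain recursion.

-- ===== PORT A =====
-- A recurses n → n-1 → … → 0; on the n ≥ 0 inputs admitted by Pre_ this is the
-- structural recursion below on n.toNat (math.factorial k = Nat.factorial k for k ≥ 0).
def noofgroupsGo : Nat → Int
  | 0 => 0
  | k + 1 => ((k : Int) + 1) * noofgroupsGo k + (Nat.factorial k : Int)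

def noofgroups (n : Int) : Int := noofgroupsGo n.toNat

-- ===== PORT B =====
-- Source B: x, fact = 0, 1; for i in range(1, n+1): x = i*x + fact; fact *= i; return x
def noofgroupsStep (s : Int × Int) (i : Int) : Int × Int := (i * s.1 + s.2, s.2 * i)

def noofgroups_alt (n : Int) : Int :=
  ((PySem.List.pyRange 1 (n + 1) 1).foldl noofgroupsStep (0, 1)).1

-- ===== PRECONDITION & SPEC =====
-- Pre_ excludes negative n, on which A never reaches its base case and raises RecursionError.
def Pre_noofgroups (n : Int) : Prop := 0 ≤ n
instance (n : Int) : Decidable (Pre_noofgroups n) := by unfold Pre_noofgroups; infer_instance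
def pvWitness_noofgroups : Int := 5

def Spec_noofgroups (n : Int) (out : Int) : Prop := out = noofgroups_alt n
instance (n : Int) (out : Int) : Decidable (Spec_noofgroups n out) := by unfold Spec_noofgroups; infer_instance

-- ===== CLAIM (what is proved, stated in full; the proofs are below) =====
def Claim_equal_noofgroups : Prop := ∀ (n : Int), Dom_noofgroups n → Pre_noofgroups n → Spec_noofgroups n (noofgroups n)

-- ===== LEMMAS AND PROOFS =====
-- Loop invariant: after i = 1..m the state is (f(m), m!).
theorem noofgroups_fold_inv (m : Nat) :
    (PySem.List.pyRange 1 ((m : Int) + 1) 1).foldl noofgroupsStep (0, 1)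
      = (noofgroupsGo m, (Nat.factorial m : Int)) := by
  induction m with
  | zero => simp [PySem.List.pyRange_one_eq_nil, noofgroupsGo, Nat.factorial]
  | succ k ih =>
      have h1 : (1 : Int) ≤ (k : Int) + 1 := by omega
      have hsplit := PySem.List.pyRange_one_succ_right (a := 1) (b := (k : Int) + 1) h1
      have hc : ((k : Int) + 1 + 1) = ((k + 1 : Nat) : Int) + 1 := by push_cast; ring
      rw [← hc, hsplit, List.foldl_append, ih]
      simp [noofgroupsStep, noofgroupsGo, Nat.factorial]
      ring

-- ===== VERDICT (by name: the statement is the Claim_ definition above) =====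
theorem noofgroups_spec : Claim_equal_noofgroups := by
  intro n _ hn
  unfold Spec_noofgroups noofgroups noofgroups_alt
  have hcast : ((n.toNat : Int)) = n := Int.toNat_of_nonneg hn
  conv_rhs => rw [← hcast]
  rw [noofgroups_fold_inv]
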